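-- pv_equiv track=rewrite | github.com/NandaGopal56/Programming | PROGRAMMING/python practice/longest-sub-array-with-sum-k0809.py | longest_sub_array_with_sum
-- ===== SOURCE A (Python) =====
-- def longest_sub_array_with_sum(mat, maxSum):
--     final = []
--     for i in range(len(mat)):
--         subArray = []
--         for j in range(i, len(mat)):
--             subArray.append(mat[j])
--             if sum(subArray) == maxSum:
--                 final.append(subArray)
--                 break
--
--     return final
-- ===== SOURCE B (Python) =====
-- def longest_sub_array_with_sum(mat, maxSum):
--     n = len(mat)
--     prefix = [0]
--     for x in mat:
--         prefix.append(prefix[-1] + x)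
--     # earliest[v] = smallest t > i with prefix[t] == v, maintained while i moves right-to-left
--     earliest = {}
--     out = []
--     for i in range(n - 1, -1, -1):
--         earliest[prefix[i + 1]] = i + 1
--         t = earliest.get(prefix[i] + maxSum)
--         if t is not None:
--             out.append(mat[i:t])
--     out.reverse()
--     return out
-- ===== Notes on version B (the rewrite author's own statement) =====
-- stated objective: faster
-- what changed: B precomputes prefix sums and scans once right-to-left maintaining a hash map from each prefix-sum value to its earliest index to the right, so the first matching end for every start is a single dict lookup instead of A's inner rescan that recomputes sum(subArray) at every step.
import Mathlib
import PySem

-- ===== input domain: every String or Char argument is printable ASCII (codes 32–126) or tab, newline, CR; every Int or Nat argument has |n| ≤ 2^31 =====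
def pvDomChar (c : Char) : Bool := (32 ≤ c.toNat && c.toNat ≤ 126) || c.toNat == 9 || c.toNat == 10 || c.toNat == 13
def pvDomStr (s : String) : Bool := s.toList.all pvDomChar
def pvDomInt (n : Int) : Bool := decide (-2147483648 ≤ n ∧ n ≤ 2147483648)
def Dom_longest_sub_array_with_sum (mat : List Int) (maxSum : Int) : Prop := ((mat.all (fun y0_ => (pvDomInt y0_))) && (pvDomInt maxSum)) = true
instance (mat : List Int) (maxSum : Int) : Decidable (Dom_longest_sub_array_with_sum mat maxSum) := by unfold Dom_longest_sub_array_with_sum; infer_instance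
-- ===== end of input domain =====

-- B replaces A's nested scan (which recomputes sum(subArray) at every step) by prefix sums plus
-- one right-to-left pass keeping a dict from each prefix-sum value to its earliest index to the
-- right; same return value for every input (objective: faster).

-- ===== PORT A =====
-- Inner loop of A for start index i: j runs over i..len(mat)-1, i.e. over the elements of
-- mat.drop i in order (mat[j] is exactly the next element of the suffix); subArray grows by
-- one element per step and its sum is recomputed and compared with maxSum each step.
def pvAInner (k : Int) (rest : List Int) (sub : List Int) : Option (List Int) :=
  match rest with
  | [] => none
  | x :: xs =>
    let sub' := sub ++ [x]               -- subArray.append(mat[j])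
    if sub'.sum == k then some sub'       -- sum(subArray) == maxSum → append & break
    else pvAInner k xs sub'

def longest_sub_array_with_sum (mat : List Int) (maxSum : Int) : List (List Int) :=
  (List.range mat.length).foldl (fun final i =>
    match pvAInner maxSum (mat.drop i) [] with
    | some s => final ++ [s]
    | none => final) []

-- ===== PORT B =====
def longest_sub_array_with_sum_alt (mat : List Int) (maxSum : Int) : List (List Int) :=
  let n := mat.length
  -- prefix = [0]; for x in mat: prefix.append(prefix[-1] + x)
  let pre := mat.foldl (fun p x => p ++ [PySem.List.pyGetD p (-1) 0 + x]) [0]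
  -- for i in range(n-1, -1, -1): earliest[prefix[i+1]] = i+1; t = earliest.get(prefix[i]+maxSum);
  --   if t is not None: out.append(mat[i:t])
  let r := (PySem.List.pyRange ((n : Int) - 1) (-1) (-1)).foldl
    (fun (st : PySem.Dict Int Int × List (List Int)) (i : Int) =>
      let earliest := st.1.insert (PySem.List.pyGetD pre (i + 1) 0) (i + 1)
      match earliest.get? (PySem.List.pyGetD pre i 0 + maxSum) with
      | some t => (earliest, st.2 ++ [PySem.List.slice mat (some i) (some t)])
      | none => (earliest, st.2))
    (PySem.Dict.empty, [])
  r.2.reverse                              -- out.reverse(); return out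

-- ===== PRECONDITION & SPEC =====
def Spec_longest_sub_array_with_sum (mat : List Int) (maxSum : Int) (out : List (List Int)) : Prop := out = longest_sub_array_with_sum_alt mat maxSum
instance (mat : List Int) (maxSum : Int) (out : List (List Int)) : Decidable (Spec_longest_sub_array_with_sum mat maxSum out) := by unfold Spec_longest_sub_array_with_sum; infer_instance

-- ===== CLAIM (what is proved, stated in full; the proofs are below) =====
def Claim_equal_longest_sub_array_with_sum : Prop := ∀ (mat : List Int) (maxSum : Int), Dom_longest_sub_array_with_sum mat maxSum → Spec_longest_sub_array_with_sum mat maxSum (longest_sub_array_with_sum mat maxSum)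

-- ===== LEMMAS AND PROOFS =====

def pvP (mat : List Int) (t : Nat) : Int := (mat.take t).sum

def pvDictAt (mat : List Int) (i : Nat) : PySem.Dict Int Int :=
  ((List.range' (i + 1) (mat.length - i)).reverse).foldl
    (fun d t => d.insert (pvP mat t) (t : Int)) PySem.Dict.empty

theorem pvDictAt_top (mat : List Int) : pvDictAt mat mat.length = PySem.Dict.empty := by
  simp [pvDictAt]

theorem pvDictAt_succ (mat : List Int) (i : Nat) (h : i < mat.length) :
    pvDictAt mat i = (pvDictAt mat (i + 1)).insert (pvP mat (i + 1)) ((i + 1 : Nat) : Int) := by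
  unfold pvDictAt
  have h1 : mat.length - i = (mat.length - (i+1)) + 1 := by omega
  rw [h1, List.range'_succ, List.reverse_cons, List.foldl_append]
  simp

theorem pvTakeDropSum (mat : List Int) (i j : Nat) :
    ((mat.drop i).take j).sum = pvP mat (i + j) - pvP mat i := by
  have : mat.take (i + j) = mat.take i ++ (mat.drop i).take j := List.take_add
  simp [pvP, this]

theorem pvRange_down (n : Nat) :
    PySem.List.pyRange ((n : Int) - 1) (-1) (-1) = List.map (fun k : Nat => (k : Int)) ((List.range n).reverse) := by
  induction n with
  | zero => simp [PySem.List.pyRange_neg_one_eq_nil]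
  | succ m ih =>
    rw [PySem.List.pyRange_neg_one_cons (by push_cast; omega)]
    push_cast
    rw [show (m:Int) + 1 - 1 - 1 = (m:Int) - 1 by ring]
    rw [ih, List.range_succ]
    simp

theorem pvPrefix_eq (mat : List Int) :
    mat.foldl (fun p x => p ++ [PySem.List.pyGetD p (-1) 0 + x]) [0]
      = (List.range (mat.length + 1)).map (pvP mat) := by
  induction mat using List.reverseRecOn with
  | nil => simp [pvP]
  | append_singleton l x ih =>
    rw [List.foldl_append]
    rw [ih]
    simp only [List.foldl_cons, List.foldl_nil]
    rw [PySem.List.pyGetD_neg_one (xs := (List.range (l.length + 1)).map (pvP l)) (d := 0) (by simp)]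
    have hlast : ((List.range (l.length + 1)).map (pvP l)).getLast (by simp) = pvP l l.length := by
      rw [List.getLast_eq_getElem]
      simp [List.getElem_map]
    rw [hlast]
    rw [show List.range ((l ++ [x]).length + 1) = List.range (l.length + 1) ++ [l.length + 1] by
      simp [List.range_succ]]
    rw [List.map_append]
    congr 1
    · apply List.map_congr_left
      intro t ht
      simp only [List.mem_range] at ht
      simp [pvP, List.take_append_of_le_length (by omega : t ≤ l.length)]
    · simp [pvP, List.take_of_length_le (by simp : (l ++ [x]).length ≤ l.length + 1)]

theorem pvDictAt_get? (mat : List Int) (v : Int) : ∀ (d : Nat) (i : Nat), mat.length - i = d → i ≤ mat.length →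
    (pvDictAt mat i).get? v
      = Option.map (fun t : Nat => (t : Int))
          ((List.range' (i + 1) (mat.length - i)).find? (fun t => decide (pvP mat t = v))) := by
  intro d
  induction d with
  | zero =>
    intro i hd h
    have hi : i = mat.length := by omega
    subst hi
    simp [pvDictAt, ]
  | succ d ih =>
    intro i hd h
    have hlt : i < mat.length := by omega
    rw [pvDictAt_succ mat i hlt]
    rw [show mat.length - i = d + 1 from hd, List.range'_succ]
    rw [PySem.Dict.get?_insert]
    by_cases h2 : pvP mat (i + 1) = v
    · rw [List.find?_cons_of_pos (by simp [h2])]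
      simp [h2]
    · rw [List.find?_cons_of_neg (by simp [h2])]
      rw [if_neg (fun hv => h2 hv.symm)]
      have := ih (i + 1) (by omega) (by omega)
      rw [this, show mat.length - (i + 1) = d by omega]

theorem pvAInner_eq' (k : Int) : ∀ (rest sub : List Int),
    pvAInner k rest sub
      = ((List.range rest.length).find? (fun m => decide ((sub ++ rest.take (m + 1)).sum = k))).map
          (fun m => sub ++ rest.take (m + 1)) := by
  intro rest
  induction rest with
  | nil => intro sub; simp [pvAInner]
  | cons x xs ih =>
    intro sub
    simp only [pvAInner]
    by_cases h : (sub ++ [x]).sum = k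
    · rw [if_pos (by simpa using h)]
      rw [List.length_cons, List.range_succ_eq_map]
      rw [List.find?_cons_of_pos (by simpa using h)]
      simp
    · rw [if_neg (by simpa using h)]
      rw [List.length_cons, List.range_succ_eq_map]
      rw [List.find?_cons_of_neg (by simpa using h)]
      rw [List.find?_map, Option.map_map, ih (sub ++ [x])]
      rcases hf : (List.range xs.length).find? (fun m => decide (((sub ++ [x]) ++ xs.take (m + 1)).sum = k)) with _ | m
      · rw [show (fun m => decide ((sub ++ (x :: xs).take (m + 1)).sum = k)) ∘ Nat.succ
             = fun m => decide (((sub ++ [x]) ++ xs.take (m + 1)).sum = k) by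
           funext m; simp [Function.comp, List.take_succ_cons]]
        rw [hf]; rfl
      · rw [show (fun m => decide ((sub ++ (x :: xs).take (m + 1)).sum = k)) ∘ Nat.succ
             = fun m => decide (((sub ++ [x]) ++ xs.take (m + 1)).sum = k) by
           funext m; simp [Function.comp, List.take_succ_cons]]
        rw [hf]
        simp [List.take_succ_cons]

theorem pvFoldOpt {α β : Type} (f : α → Option β) : ∀ (l : List α) (acc : List β),
    l.foldl (fun acc x => acc ++ (f x).toList) acc = acc ++ l.filterMap f := by
  intro l
  induction l with
  | nil => intro acc; simp
  | cons x xs ih =>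
    intro acc
    rw [List.foldl_cons, List.filterMap_cons]
    cases hf : f x with
    | none => simp [ih]
    | some s => simp [ih]

def pvStep (mat : List Int) (k : Int) (st : PySem.Dict Int Int × List (List Int)) (i : Int) :
    PySem.Dict Int Int × List (List Int) :=
  let earliest := st.1.insert (PySem.List.pyGetD ((List.range (mat.length + 1)).map (pvP mat)) (i + 1) 0) (i + 1)
  match earliest.get? (PySem.List.pyGetD ((List.range (mat.length + 1)).map (pvP mat)) i 0 + k) with
  | some t => (earliest, st.2 ++ [PySem.List.slice mat (some i) (some t)])
  | none => (earliest, st.2)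

theorem pvBLoop (mat : List Int) (k : Int) : ∀ (m : Nat), m ≤ mat.length → ∀ (out : List (List Int)) ,
    ((List.range m).reverse).foldl (fun st (j : Nat) => pvStep mat k st (j : Int)) (pvDictAt mat m, out)
    = (pvDictAt mat 0, out ++ ((List.range m).reverse).filterMap
        (fun i => ((pvDictAt mat i).get? (pvP mat i + k)).map
          (fun t => PySem.List.slice mat (some (i : Int)) (some t)))) := by
  intro m
  induction m with
  | zero => intro _ out; simp
  | succ m ih =>
    intro hm out
    rw [show (List.range (m + 1)).reverse = m :: (List.range m).reverse by
      rw [List.range_succ]; simp]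
    rw [List.foldl_cons, List.filterMap_cons]
    have hg1 : PySem.List.pyGetD ((List.range (mat.length + 1)).map (pvP mat)) ((m : Int) + 1) 0
        = pvP mat (m + 1) := by
      rw [show ((m : Int) + 1) = ((m + 1 : Nat) : Int) by push_cast; ring]
      rw [PySem.List.pyGetD_natCast, PySem.List.getD_map_range _ _ _ _ (by omega)]
    have hg0 : PySem.List.pyGetD ((List.range (mat.length + 1)).map (pvP mat)) ((m : Int)) 0
        = pvP mat m := by
      rw [PySem.List.pyGetD_natCast, PySem.List.getD_map_range _ _ _ _ (by omega)]
    have hins : (pvDictAt mat (m + 1)).insert (pvP mat (m + 1)) ((m : Int) + 1) = pvDictAt mat m := by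
      rw [pvDictAt_succ mat m (by omega)]
      norm_cast
    cases hf : (pvDictAt mat m).get? (pvP mat m + k) with
    | none =>
      have hstep : pvStep mat k (pvDictAt mat (m + 1), out) (m : Int) = (pvDictAt mat m, out) := by
        simp only [pvStep, hg1, hg0, hins, hf]
      rw [hstep, ih (by omega) out]
      simp
    | some t =>
      have hstep : pvStep mat k (pvDictAt mat (m + 1), out) (m : Int)
          = (pvDictAt mat m, out ++ [PySem.List.slice mat (some (m : Int)) (some t)]) := by
        simp only [pvStep, hg1, hg0, hins, hf]
      rw [hstep, ih (by omega) (out ++ [PySem.List.slice mat (some (m : Int)) (some t)])]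
      simp

theorem longest_sub_array_with_sum_eq_alt (mat : List Int) (maxSum : Int) :
    longest_sub_array_with_sum mat maxSum = longest_sub_array_with_sum_alt mat maxSum := by
  unfold longest_sub_array_with_sum
  rw [show (fun (final : List (List Int)) (i : Nat) =>
        match pvAInner maxSum (List.drop i mat) [] with
        | some s => final ++ [s]
        | none => final)
      = fun final i => final ++ (pvAInner maxSum (mat.drop i) []).toList by
    funext final i
    cases pvAInner maxSum (mat.drop i) [] <;> simp]
  rw [pvFoldOpt (fun i => pvAInner maxSum (mat.drop i) [])]
  simp only [longest_sub_array_with_sum_alt]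
  rw [pvPrefix_eq, pvRange_down, List.foldl_map]
  rw [show (PySem.Dict.empty : PySem.Dict Int Int) = pvDictAt mat mat.length from (pvDictAt_top mat).symm]
  refine Eq.trans ?_ ((congrArg (fun p : PySem.Dict Int Int × List (List Int) => p.2.reverse)
    (pvBLoop mat maxSum mat.length le_rfl [])).symm)
  simp only [List.nil_append, List.filterMap_reverse, List.reverse_reverse]
  apply List.filterMap_congr
  intro i hi
  rw [List.mem_range] at hi
  rw [pvAInner_eq', List.length_drop]
  rw [pvDictAt_get? mat (pvP mat i + maxSum) (mat.length - i) i rfl (by omega)]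
  rw [List.range'_eq_map_range, List.find?_map, Option.map_map, Option.map_map]
  rw [show (fun m => decide (((([] : List Int) ++ (mat.drop i).take (m + 1))).sum = maxSum))
      = ((fun t => decide (pvP mat t = pvP mat i + maxSum)) ∘ fun x => i + 1 + x) by
    funext m
    simp only [List.nil_append, Function.comp]
    rw [decide_eq_decide]
    have h1 := pvTakeDropSum mat i (m + 1)
    rw [show i + (m + 1) = i + 1 + m by omega] at h1
    rw [h1]
    constructor <;> intro <;> omega]
  cases hf : List.find? ((fun t => decide (pvP mat t = pvP mat i + maxSum)) ∘ fun x => i + 1 + x) (List.range (mat.length - i)) with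
  | none => simp
  | some m =>
    simp only [Option.map_some, Function.comp]
    rw [List.nil_append, PySem.List.slice_natCast]
    rw [show i + 1 + m - i = m + 1 by omega]

-- ===== VERDICT (by name: the statement is the Claim_ definition above) =====
theorem longest_sub_array_with_sum_spec : Claim_equal_longest_sub_array_with_sum := by
  intro mat maxSum _
  exact longest_sub_array_with_sum_eq_alt mat maxSum
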